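-- pv_equiv track=rewrite | github.com/shashank231/imp-my-prep | Array/package_1/trapping_water.py | maxOnLeft
-- ===== SOURCE A (Python) =====
-- def maxOnLeft(arr):
--     lenArr = len(arr)
--     answer = list()
--     currMax = arr[0]
--     currMaxIndex = 0
--     answer.append(currMaxIndex)
--     for index in range(1, lenArr):
--         currEle = arr[index]
--         if currEle > currMax:
--             currMax = currEle
--             currMaxIndex = index
--         answer.append(currMaxIndex)
--     return answer
-- ===== SOURCE B (Python) =====
-- def maxOnLeft(arr):
--     # Declarative staged computation: for each prefix, take its maximum value and
--     # resolve it to its first occurrence in the array (the earliest argmax).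
--     return [arr.index(max(arr[:i + 1])) for i in range(len(arr))]
-- ===== Notes on version B (the rewrite author's own statement) =====
-- stated objective: simpler
-- what changed: B drops the running currMax/currMaxIndex state entirely: for each position it takes the maximum of the prefix slice and resolves it to its first occurrence with arr.index, a stateless two-stage computation per entry (max then index).
import Mathlib
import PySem

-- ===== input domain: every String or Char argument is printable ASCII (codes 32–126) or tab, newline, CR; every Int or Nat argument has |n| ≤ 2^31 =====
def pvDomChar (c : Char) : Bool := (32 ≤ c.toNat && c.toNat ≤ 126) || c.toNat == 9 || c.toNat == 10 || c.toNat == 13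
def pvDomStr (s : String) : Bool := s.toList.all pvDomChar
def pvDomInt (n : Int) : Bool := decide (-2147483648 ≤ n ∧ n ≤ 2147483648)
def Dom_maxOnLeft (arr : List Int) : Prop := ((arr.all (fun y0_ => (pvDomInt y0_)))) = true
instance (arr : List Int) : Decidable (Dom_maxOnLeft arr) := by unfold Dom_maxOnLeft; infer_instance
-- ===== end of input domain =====

-- B replaces A's stateful running currMax/currMaxIndex loop by a stateless per-position
-- computation (max of the prefix slice, resolved to its first occurrence): simpler, not faster.


-- ===== PORT A =====
def maxOnLeft (arr : List Int) : List Int :=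
  -- arr[0] raises IndexError on empty input; Pre_maxOnLeft excludes it, the 'none' arm returns []
  match PySem.List.pyGet? arr 0 with
  | none => []
  | some a0 =>
    ((PySem.List.pyRange 1 arr.length 1).foldl
      (fun (st : List Int × Int × Int) index =>
        -- arr[index] with index from range(1, len(arr)) is always in range, so pyGetD 0 is exact
        let currEle := PySem.List.pyGetD arr index 0
        if currEle > st.2.1 then (st.1 ++ [index], currEle, index)
        else (st.1 ++ [st.2.2], st.2.1, st.2.2))
      ([0], a0, 0)).1

-- ===== PORT B =====
def maxOnLeft_alt (arr : List Int) : List Int :=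
  (PySem.List.pyRange 0 arr.length 1).map (fun i =>
    -- max(arr[:i+1]) raises ValueError only on an empty slice, impossible for 0 ≤ i < len;
    -- arr.index(m) raises only when m is absent, impossible since m ∈ arr: both 'none' arms return 0
    match PySem.List.max? (PySem.List.slice arr none (some (i + 1))) (fun y => y) with
    | none => 0
    | some m =>
      match PySem.List.index? arr m with
      | none => 0
      | some k => (k : Int))

-- ===== PRECONDITION & SPEC =====
-- Pre_ excludes only the empty list, on which Python A raises IndexError (arr[0])
def Pre_maxOnLeft (arr : List Int) : Prop := arr ≠ []
instance (arr : List Int) : Decidable (Pre_maxOnLeft arr) := by unfold Pre_maxOnLeft; infer_instance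
def pvWitness_maxOnLeft : List Int := [3, 1, 4, 1, 5]

def Spec_maxOnLeft (arr : List Int) (out : List Int) : Prop := out = maxOnLeft_alt arr
instance (arr : List Int) (out : List Int) : Decidable (Spec_maxOnLeft arr out) := by unfold Spec_maxOnLeft; infer_instance

-- ===== CLAIM (what is proved, stated in full; the proofs are below) =====
def Claim_equal_maxOnLeft : Prop := ∀ (arr : List Int), Dom_maxOnLeft arr → Pre_maxOnLeft arr → Spec_maxOnLeft arr (maxOnLeft arr)

-- ===== LEMMAS AND PROOFS =====

-- Proof-only names for the two loop bodies (A's state fold, B's per-position map body).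
def pvStepA (arr : List Int) (st : List Int × Int × Int) (index : Int) : List Int × Int × Int :=
  let currEle := PySem.List.pyGetD arr index 0
  if currEle > st.2.1 then (st.1 ++ [index], currEle, index)
  else (st.1 ++ [st.2.2], st.2.1, st.2.2)

def pvG (arr : List Int) (i : Int) : Int :=
  match PySem.List.max? (PySem.List.slice arr none (some (i + 1))) (fun y => y) with
  | none => 0
  | some m =>
    match PySem.List.index? arr m with
    | none => 0
    | some k => (k : Int)

theorem pvStepA_eq (arr : List Int) :
    (fun (st : List Int × Int × Int) index =>
      let currEle := PySem.List.pyGetD arr index 0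
      if currEle > st.2.1 then (st.1 ++ [index], currEle, index)
      else (st.1 ++ [st.2.2], st.2.1, st.2.2)) = pvStepA arr := rfl

-- the invariant: after folding range(1, n), A's answer equals B's first n entries,
-- A's currMax is the maximum of the first n elements and currMaxIndex its first occurrence in arr
theorem pv_max_append (l : List Int) (x M : Int)
    (h : PySem.List.max? l (fun y => y) = some M) :
    PySem.List.max? (l ++ [x]) (fun y => y) = some (max M x) := by
  cases l with
  | nil => simp [PySem.List.max?] at h
  | cons y ys =>
    rw [PySem.List.max?_id_cons] at h
    injection h with h
    rw [List.cons_append, PySem.List.max?_id_cons, List.foldl_append, h]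
    rfl

theorem pv_inv (a0 : Int) (t : List Int) (n : Nat) :
    1 ≤ n → n ≤ (a0 :: t).length →
    (((PySem.List.pyRange 1 (n : Int) 1).foldl (pvStepA (a0 :: t)) ([0], a0, 0)).1
        = (PySem.List.pyRange 0 (n : Int) 1).map (pvG (a0 :: t)) ∧
      PySem.List.max? ((a0 :: t).take n) (fun y => y)
        = some ((PySem.List.pyRange 1 (n : Int) 1).foldl (pvStepA (a0 :: t)) ([0], a0, 0)).2.1 ∧
      ∃ j : Nat,
        ((PySem.List.pyRange 1 (n : Int) 1).foldl (pvStepA (a0 :: t)) ([0], a0, 0)).2.2 = (j : Int) ∧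
        PySem.List.index? (a0 :: t)
          ((PySem.List.pyRange 1 (n : Int) 1).foldl (pvStepA (a0 :: t)) ([0], a0, 0)).2.1 = some j) := by
  induction n with
  | zero => omega
  | succ m ih =>
    intro _ h2
    by_cases hm : 1 ≤ m
    · obtain ⟨hans, hmax, j, hj, hidx⟩ := ih hm (by omega)
      clear ih
      have hml : m < (a0 :: t).length := by omega
      have hr1 : PySem.List.pyRange 1 ((m + 1 : Nat) : Int) 1
          = PySem.List.pyRange 1 (m : Int) 1 ++ [(m : Int)] := by
        push_cast; exact PySem.List.pyRange_one_succ_right (by exact_mod_cast hm)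
      have hr0 : PySem.List.pyRange 0 ((m + 1 : Nat) : Int) 1
          = PySem.List.pyRange 0 (m : Int) 1 ++ [(m : Int)] := by
        push_cast; exact PySem.List.pyRange_one_succ_right (by positivity)
      rw [hr1, hr0, List.foldl_append, List.map_append]
      set sA := (PySem.List.pyRange 1 (m : Int) 1).foldl (pvStepA (a0 :: t)) ([0], a0, 0) with hsA
      have hx : PySem.List.pyGetD (a0 :: t) (m : Int) 0 = (a0 :: t)[m] := by
        simp [List.getD_eq_getElem?_getD, List.getElem?_eq_getElem hml]
      have htake : (a0 :: t).take (m + 1) = (a0 :: t).take m ++ [(a0 :: t)[m]] := by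
        rw [List.take_add_one, List.getElem?_eq_getElem hml]; rfl
      have hslice : PySem.List.slice (a0 :: t) none (some ((m : Int) + 1))
          = (a0 :: t).take (m + 1) := by
        have : ((m : Int) + 1) = ((m + 1 : Nat) : Int) := by push_cast; ring
        rw [this, PySem.List.slice_to_natCast]
      have hmaxstep := pv_max_append ((a0 :: t).take m) ((a0 :: t)[m]) sA.2.1 hmax
      simp only [List.foldl, pvStepA, hx]
      by_cases hc : (a0 :: t)[m] > sA.2.1
      · simp only [if_pos hc]
        have hlem : PySem.List.max? ((a0 :: t).take (m + 1)) (fun y => y)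
            = some ((a0 :: t)[m]) := by
          rw [htake, hmaxstep, max_eq_right (le_of_lt hc)]
        have hnotmem : (a0 :: t)[m] ∉ (a0 :: t).take m := by
          intro hmem
          have hle := PySem.List.max?_isMax hmax _ hmem
          simp only [] at hle
          omega
        have hdecomp : (a0 :: t) = (a0 :: t).take m ++ (a0 :: t)[m] :: (a0 :: t).drop (m + 1) := by
          conv_lhs => rw [← List.take_append_drop m (a0 :: t)]
          rw [List.getElem_cons_drop hml]
        have hidxm : PySem.List.index? (a0 :: t) ((a0 :: t)[m]) = some m := by
          rw [PySem.List.index?_eq_some_iff]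
          have hml' : m < t.length + 1 := by simpa using hml
          exact ⟨(a0 :: t).take m, (a0 :: t).drop (m + 1), hdecomp,
            by rw [List.length_take, List.length_cons]; omega, hnotmem⟩
        refine ⟨?_, ?_, m, rfl, ?_⟩
        · rw [hans]
          congr 1
          simp only [List.map_cons, List.map_nil]
          unfold pvG
          rw [hslice, hlem]
          simp only []
          rw [hidxm]
        · exact hlem
        · exact hidxm
      · simp only [if_neg hc]
        have hle : (a0 :: t)[m] ≤ sA.2.1 := by omega
        have hlem : PySem.List.max? ((a0 :: t).take (m + 1)) (fun y => y) = some sA.2.1 := by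
          rw [htake, hmaxstep, max_eq_left hle]
        refine ⟨?_, hlem, j, hj, hidx⟩
        rw [hans]
        congr 1
        simp only [List.map_cons, List.map_nil]
        unfold pvG
        rw [hslice, hlem]
        simp only [hj]
        rw [hidx]
    · have hm0 : m = 0 := by omega
      subst hm0
      have h1 : PySem.List.pyRange 1 ((1 : Nat) : Int) 1 = [] := by
        push_cast
        exact PySem.List.pyRange_one_eq_nil (le_refl 1)
      have h0 : PySem.List.pyRange 0 ((1 : Nat) : Int) 1 = [(0 : Int)] := by
        push_cast
        simpa using PySem.List.pyRange_one_singleton (a := (0 : Int))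
      rw [h1, h0]
      have hidx0 : PySem.List.index? (a0 :: t) a0 = some 0 :=
        PySem.List.index?_cons_self a0 t
      have hg : pvG (a0 :: t) 0 = 0 := by
        unfold pvG
        have hsl : PySem.List.slice (a0 :: t) none (some ((0 : Int) + 1)) = [a0] := by
          have hb : ((0 : Int) + 1) = ((1 : Nat) : Int) := by norm_num
          rw [hb, PySem.List.slice_to_natCast]
          simp
        rw [hsl, PySem.List.max?_id_cons]
        simp only [List.foldl_nil]
        rw [hidx0]
        rfl
      refine ⟨by simp [hg], ?_, 0, rfl, ?_⟩
      · simp [PySem.List.max?_id_cons]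
      · simpa using hidx0

-- ===== VERDICT (by name: the statement is the Claim_ definition above) =====
theorem maxOnLeft_spec : Claim_equal_maxOnLeft := by
  intro arr _ hpre
  cases arr with
  | nil => exact absurd rfl hpre
  | cons a0 t =>
    unfold Spec_maxOnLeft maxOnLeft maxOnLeft_alt
    rw [PySem.List.pyGet?_zero_cons, pvStepA_eq]
    exact (pv_inv a0 t (a0 :: t).length (by simp) (le_refl _)).1
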